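-- pv_equiv track=rewrite | github.com/LakshyAAAgrawal/simplifi-K-tion | Ksimplifier.py | reduce_to_min_number_of_implicants
-- ===== SOURCE A (Python) =====
-- def reduce_to_min_number_of_implicants(list_of_all_solutions):
--     '''
--     Input : list_of_all_solutions = a list of lists, with each element(list) representing a possible solution for the given function(as obtained from                                                                   list_of_all_possible_solutions())
--
--     This function first compares the number of terms required by each solution in the list_of_all_solutions, and then finds the smallest number of terms required.
--     It then returns a list of lists(representing solutions) which contains the smallest number of terms in the soltion possible.
--     '''
--     smallest=10000000
--     for i in list_of_all_solutions:
--         if len(i)<smallest: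
--             smallest=len(i)
--     final=[]
--     for i in list_of_all_solutions:
--         if len(i)==smallest:
--             final.append(i)
--     return(final)
-- ===== SOURCE B (Python) =====
-- def reduce_to_min_number_of_implicants(list_of_all_solutions):
--     # Single pass: track the smallest length seen so far and the running
--     # bucket of solutions having that length (reset when a smaller one appears).
--     smallest = 10000000
--     final = []
--     for i in list_of_all_solutions:
--         n = len(i)
--         if n < smallest:
--             smallest = n
--             final = [i]
--         elif n == smallest:
--             final.append(i)
--     return final
-- ===== Notes on version B (the rewrite author's own statement) =====
-- stated objective: alternative
-- what changed: Replaces A's two scans (one to find the minimum length, one to collect matches) by a single pass that maintains the running minimum together with its bucket of solutions, resetting the bucket whenever a smaller length appears.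
import Mathlib
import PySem

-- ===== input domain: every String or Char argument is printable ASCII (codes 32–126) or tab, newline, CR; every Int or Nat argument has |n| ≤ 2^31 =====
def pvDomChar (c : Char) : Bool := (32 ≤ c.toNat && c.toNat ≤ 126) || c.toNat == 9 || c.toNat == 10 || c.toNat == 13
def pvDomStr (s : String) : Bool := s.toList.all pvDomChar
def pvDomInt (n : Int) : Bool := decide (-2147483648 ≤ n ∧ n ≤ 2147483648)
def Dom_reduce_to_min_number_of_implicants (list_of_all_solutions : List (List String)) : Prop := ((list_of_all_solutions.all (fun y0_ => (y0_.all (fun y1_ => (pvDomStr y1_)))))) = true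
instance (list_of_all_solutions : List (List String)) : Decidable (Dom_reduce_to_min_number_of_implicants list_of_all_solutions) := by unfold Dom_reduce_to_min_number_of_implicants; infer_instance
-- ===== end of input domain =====

-- B replaces A's two scans (min length, then matches) by a single pass that keeps the running
-- minimum length together with its bucket of solutions; same objective, one traversal instead of two.


-- ===== PORT A =====
-- first loop of A: running minimum of the lengths, seeded with the sentinel 10000000
def pvMinStep (s : Int) (i : List String) : Int :=
  if (i.length : Int) < s then (i.length : Int) else s

def reduce_to_min_number_of_implicants (list_of_all_solutions : List (List String)) : List (List String) :=
  let smallest := list_of_all_solutions.foldl pvMinStep 10000000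
  list_of_all_solutions.foldl
    (fun final i => if ((i.length : Int) = smallest) then final ++ [i] else final)
    ([] : List (List String))

-- ===== PORT B =====
-- single-pass step of B: state = (smallest length so far, running bucket of solutions of that length)
def pvAltStep (st : Int × List (List String)) (i : List String) : Int × List (List String) :=
  let n : Int := (i.length : Int)
  if n < st.1 then (n, [i])
  else if n = st.1 then (st.1, st.2 ++ [i])
  else st

def reduce_to_min_number_of_implicants_alt (list_of_all_solutions : List (List String)) : List (List String) :=
  (list_of_all_solutions.foldl pvAltStep (10000000, ([] : List (List String)))).2

-- ===== PRECONDITION & SPEC =====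
def Spec_reduce_to_min_number_of_implicants (list_of_all_solutions : List (List String)) (out : List (List String)) : Prop := out = reduce_to_min_number_of_implicants_alt list_of_all_solutions
instance (list_of_all_solutions : List (List String)) (out : List (List String)) : Decidable (Spec_reduce_to_min_number_of_implicants list_of_all_solutions out) := by unfold Spec_reduce_to_min_number_of_implicants; infer_instance

-- ===== CLAIM (what is proved, stated in full; the proofs are below) =====
def Claim_equal_reduce_to_min_number_of_implicants : Prop := ∀ (list_of_all_solutions : List (List String)), Dom_reduce_to_min_number_of_implicants list_of_all_solutions → Spec_reduce_to_min_number_of_implicants list_of_all_solutions (reduce_to_min_number_of_implicants list_of_all_solutions)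

-- ===== LEMMAS AND PROOFS =====

-- the running minimum never exceeds its seed
theorem pvMinStep_foldl_le : ∀ (xs : List (List String)) (s : Int), xs.foldl pvMinStep s ≤ s := by
  intro xs
  induction xs with
  | nil => intro s; simp
  | cons i t ih =>
    intro s
    simp only [List.foldl, pvMinStep]
    split
    · exact le_trans (ih _) (by omega)
    · exact ih s

-- B's one-pass fold computes A's minimum together with the bucket of minimal-length elements;
-- the seed bucket survives only if the seed itself is the minimum.
theorem pvAltStep_foldl_spec : ∀ (xs : List (List String)) (s : Int) (acc : List (List String)),
    xs.foldl pvAltStep (s, acc) =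
      (xs.foldl pvMinStep s,
       (if xs.foldl pvMinStep s = s then acc else []) ++
         xs.filter (fun i => decide ((i.length : Int) = xs.foldl pvMinStep s))) := by
  intro xs
  induction xs with
  | nil => intro s acc; simp
  | cons i t ih =>
    intro s acc
    simp only [List.foldl, pvAltStep, pvMinStep]
    by_cases h1 : (i.length : Int) < s
    · simp only [h1, if_pos]
      rw [ih]
      have hle := pvMinStep_foldl_le t ((i.length : Int))
      have hne : t.foldl pvMinStep (i.length : Int) ≠ s := by omega
      simp only [hne, List.filter]
      by_cases h2 : t.foldl pvMinStep (i.length : Int) = (i.length : Int)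
      · simp [h2]
      · simp [h2, Ne.symm h2]
    · simp only [h1]
      by_cases h2 : (i.length : Int) = s
      · simp only [h2, if_pos, if_neg, not_false_iff]
        rw [ih]
        by_cases h3 : t.foldl pvMinStep s = s
        · simp [h3, h2, List.filter, List.append_assoc]
        · have h4 : s ≠ t.foldl pvMinStep s := fun h => h3 h.symm
          simp [h3, h2, List.filter, h4]
      · simp only [h2, if_neg, not_false_iff]
        rw [ih]
        have hle := pvMinStep_foldl_le t s
        have hne : (i.length : Int) ≠ t.foldl pvMinStep s := by omega
        simp [List.filter, hne]

-- ===== VERDICT (by name: the statement is the Claim_ definition above) =====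
theorem reduce_to_min_number_of_implicants_spec : Claim_equal_reduce_to_min_number_of_implicants := by
  intro xs _
  show _ = reduce_to_min_number_of_implicants_alt xs
  unfold reduce_to_min_number_of_implicants reduce_to_min_number_of_implicants_alt
  rw [pvAltStep_foldl_spec]
  have := PySem.List.foldl_append_if
    (fun i => decide ((i.length : Int) = xs.foldl pvMinStep 10000000))
    (id : List String → List String) xs ([] : List (List String))
  simp only [decide_eq_true_eq, List.map_id, List.nil_append, id] at this
  rw [this]
  split <;> simp
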